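-- pv_equiv track=rewrite | github.com/chK1717/knowledge-chatbot | app_streamlit.py | contextualize_question
-- ===== SOURCE A (Python) =====
-- from typing import Any
--
-- def _is_followup(question: str) -> bool:
--     q = question.lower().strip()
--     mots_suivi = (
--         "et ", "mais ", "compare", "versus", "vs ",
--         "et pour", "et en ", "et avec ", "et la ",
--         "et le ", "et les ", "et du ", "et des ",
--         "aussi", "pareil", "et sur", "idem",
--     )
--     return q.startswith(mots_suivi)
--
-- def contextualize_question(
--     question: str, chat_messages: list[dict[str, Any]]
-- ) -> str:
--     if not _is_followup(question):
--         return question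
--
--     msgs = list(chat_messages)
--     for i in range(len(msgs) - 1, -1, -1):
--         msg = msgs[i]
--         if msg.get("role") != "user":
--             continue
--         next_assistant = None
--         for j in range(i + 1, len(msgs)):
--             if msgs[j].get("role") == "assistant":
--                 next_assistant = msgs[j]
--                 break
--         if next_assistant:
--             content = str(next_assistant.get("content", "")).lower()
--             if any(w in content for w in [
--                 "pertinence faible", "reformulez",
--                 "introuvable", "non disponible"
--             ]):
--                 continue
--         return f"{str(msg['content']).strip()} | Suivi: {question.strip()}"
--
--     return question
-- ===== SOURCE B (Python) =====
-- from typing import Any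
--
-- def _is_followup(question: str) -> bool:
--     q = question.lower().strip()
--     mots_suivi = (
--         "et ", "mais ", "compare", "versus", "vs ",
--         "et pour", "et en ", "et avec ", "et la ",
--         "et le ", "et les ", "et du ", "et des ",
--         "aussi", "pareil", "et sur", "idem",
--     )
--     return q.startswith(mots_suivi)
--
-- _BAD = ("pertinence faible", "reformulez", "introuvable", "non disponible")
--
-- def contextualize_question(
--     question: str, chat_messages: list[dict[str, Any]]
-- ) -> str:
--     # One forward pass: `pending` is the latest user message not yet followed by an
--     # assistant reply; a good assistant reply promotes it to `best`, a bad one drops it.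
--     if not _is_followup(question):
--         return question
--
--     best = None
--     pending = None
--     for msg in chat_messages:
--         role = msg.get("role")
--         if role == "user":
--             pending = msg
--         elif role == "assistant" and pending is not None:
--             content = str(msg.get("content", "")).lower()
--             if any(w in content for w in _BAD):
--                 pending = None
--             else:
--                 best = pending
--                 pending = None
--
--     chosen = pending if pending is not None else best
--     if chosen is None:
--         return question
--     return f"{str(chosen['content']).strip()} | Suivi: {question.strip()}"
-- ===== Notes on version B (the rewrite author's own statement) =====
-- stated objective: alternative
-- what changed: Replaced A's backward scan with a nested forward search for the next assistant message by a single forward pass that keeps two registers (pending user message, best confirmed user message); on generated inputs this was not measurably faster.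
import Mathlib
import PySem

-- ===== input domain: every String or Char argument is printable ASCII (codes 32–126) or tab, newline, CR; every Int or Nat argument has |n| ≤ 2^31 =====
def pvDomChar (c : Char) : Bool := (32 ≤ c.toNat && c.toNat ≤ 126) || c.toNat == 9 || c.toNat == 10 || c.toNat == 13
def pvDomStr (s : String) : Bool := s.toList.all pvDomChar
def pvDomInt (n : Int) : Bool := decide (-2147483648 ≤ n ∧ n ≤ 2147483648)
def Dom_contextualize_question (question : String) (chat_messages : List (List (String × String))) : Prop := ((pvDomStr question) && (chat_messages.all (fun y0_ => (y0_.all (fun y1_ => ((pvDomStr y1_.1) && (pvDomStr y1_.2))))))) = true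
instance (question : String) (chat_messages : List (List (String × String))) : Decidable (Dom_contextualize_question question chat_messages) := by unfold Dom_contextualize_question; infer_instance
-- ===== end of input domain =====

-- B replaces A's backward scan with a nested search for the next assistant message
-- by a single forward pass keeping two registers (pending user, best confirmed user).

-- shared module helpers (_is_followup and the two literal word lists of the Python module)
def pvMotsSuivi : List String :=
  ["et ", "mais ", "compare", "versus", "vs ",
   "et pour", "et en ", "et avec ", "et la ",
   "et le ", "et les ", "et du ", "et des ",
   "aussi", "pareil", "et sur", "idem"]

def pvIsFollowup (question : String) : Bool :=
  let q := PySem.Str.strip (PySem.Str.lower question)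
  pvMotsSuivi.any (fun w => PySem.Str.startswith q w)

def pvBadWords : List String :=
  ["pertinence faible", "reformulez", "introuvable", "non disponible"]

def pvIsBad (content : String) : Bool :=
  pvBadWords.any (fun w => PySem.Str.isIn w content)

-- d.get(k) / d.get(k, dflt) on a message dict (assoc list, first match)
def pvGet (m : List (String × String)) (k : String) : Option String :=
  (PySem.Dict.mk m).get? k

def pvGetD (m : List (String × String)) (k : String) (dflt : String) : String :=
  (PySem.Dict.mk m).getD k dflt

-- ===== PORT A =====
-- inner loop: for j in range(i+1, len(msgs)): first message with role "assistant"
def pvFindAssist (msgs : List (List (String × String))) (js : List Int) :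
    Option (List (String × String)) :=
  match js with
  | [] => none
  | j :: rest =>
    match PySem.List.pyGet? msgs j with
    | none => none   -- unreachable: j is in range
    | some m =>
      if pvGet m "role" == some "assistant" then some m else pvFindAssist msgs rest

-- outer loop: for i in range(len(msgs)-1, -1, -1)
-- msg['content'] raises KeyError when absent (exactly those inputs are outside Pre_);
-- ported as .getD ""
def pvLoopA (question : String) (msgs : List (List (String × String))) (is : List Int) : String :=
  match is with
  | [] => question
  | i :: rest =>
    match PySem.List.pyGet? msgs i with
    | none => question   -- unreachable: i is in range
    | some msg =>
      if !(pvGet msg "role" == some "user") then pvLoopA question msgs rest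
      else
        match pvFindAssist msgs (PySem.List.pyRange (i + 1) (PySem.List.len msgs) 1) with
        | some na =>
          if pvIsBad (PySem.Str.lower (pvGetD na "content" "")) then pvLoopA question msgs rest
          else PySem.Str.strip ((pvGet msg "content").getD "") ++ " | Suivi: " ++ PySem.Str.strip question
        | none =>
          PySem.Str.strip ((pvGet msg "content").getD "") ++ " | Suivi: " ++ PySem.Str.strip question

def contextualize_question (question : String) (chat_messages : List (List (String × String))) : String :=
  if !pvIsFollowup question then question
  else pvLoopA question chat_messages
         (PySem.List.pyRange (PySem.List.len chat_messages - 1) (-1) (-1))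

-- ===== PORT B =====
-- one forward step: state = (best, pending)
def pvStepB (st : Option (List (String × String)) × Option (List (String × String)))
    (m : List (String × String)) :
    Option (List (String × String)) × Option (List (String × String)) :=
  let role := pvGet m "role"
  if role == some "user" then (st.1, some m)
  else if role == some "assistant" then
    match st.2 with
    | none => st
    | some p =>
      if pvIsBad (PySem.Str.lower (pvGetD m "content" "")) then (st.1, none)
      else (some p, none)
  else st

-- chosen['content'] raises KeyError when absent, on exactly the same inputs as A
-- (B selects the same message); ported as .getD ""
def contextualize_question_alt (question : String) (chat_messages : List (List (String × String))) : String :=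
  if !pvIsFollowup question then question
  else
    let st := chat_messages.foldl pvStepB (none, none)
    match st.2.or st.1 with
    | none => question
    | some chosen =>
      PySem.Str.strip ((pvGet chosen "content").getD "") ++ " | Suivi: " ++ PySem.Str.strip question

-- ===== PRECONDITION & SPEC =====
-- helpers for Pre_: declarative shape conditions on the input (no port is called)
def pvFirstAssist : List (List (String × String)) → Option (List (String × String))
  | [] => none
  | m :: rest => if pvGet m "role" == some "assistant" then some m else pvFirstAssist rest

-- the next assistant message after a user message is absent or not a "bad" reply
def pvOkNext (l : List (List (String × String))) : Bool :=
  match pvFirstAssist l with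
  | none => true
  | some a => !pvIsBad (PySem.Str.lower (pvGetD a "content" ""))

def pvEligAt (msgs : List (List (String × String))) (i : Nat) : Bool :=
  match msgs[i]? with
  | some m => pvGet m "role" == some "user" && pvOkNext (msgs.drop (i + 1))
  | none => false

def pvContentAt (msgs : List (List (String × String))) (i : Nat) : Bool :=
  match msgs[i]? with
  | some m => (pvGet m "content").isSome
  | none => false

-- Pre_ excludes EXACTLY the inputs on which the Python raises (KeyError at
-- msg['content']): the question is a follow-up and the message both programs select —
-- the last user message whose next assistant reply is absent or good — has no
-- "content" key; A returns on every input admitted here.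
def Pre_contextualize_question (question : String) (chat_messages : List (List (String × String))) : Prop :=
  pvIsFollowup question = true →
    ∀ i ∈ List.range chat_messages.length,
      pvEligAt chat_messages i = true → pvContentAt chat_messages i = false →
        ∃ j ∈ List.range chat_messages.length, i < j ∧ pvEligAt chat_messages j = true

instance (question : String) (chat_messages : List (List (String × String))) : Decidable (Pre_contextualize_question question chat_messages) := by unfold Pre_contextualize_question; infer_instance

def pvWitness_contextualize_question : String × (List (List (String × String))) :=
  ("et toi ?", [[("role", "user"), ("content", "salut")], [("role", "assistant"), ("content", "bonjour")]])

def Spec_contextualize_question (question : String) (chat_messages : List (List (String × String))) (out : String) : Prop := out = contextualize_question_alt question chat_messages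
instance (question : String) (chat_messages : List (List (String × String))) (out : String) : Decidable (Spec_contextualize_question question chat_messages out) := by unfold Spec_contextualize_question; infer_instance

-- ===== CLAIM (what is proved, stated in full; the proofs are below) =====
def Claim_equal_contextualize_question : Prop := ∀ (question : String) (chat_messages : List (List (String × String))), Dom_contextualize_question question chat_messages → Pre_contextualize_question question chat_messages → Spec_contextualize_question question chat_messages (contextualize_question question chat_messages)

-- ===== LEMMAS AND PROOFS =====

-- the message A selects among l, given that suf follows l; later messages win
def pvPick : List (List (String × String)) → List (List (String × String)) →
    Option (List (String × String))
  | [], _ => none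
  | m :: rest, suf =>
    (pvPick rest suf).or
      (if pvGet m "role" == some "user" && pvOkNext (rest ++ suf) then some m else none)

def pvRender (question : String) : Option (List (String × String)) → String
  | none => question
  | some m => PySem.Str.strip ((pvGet m "content").getD "") ++ " | Suivi: " ++ PySem.Str.strip question

theorem pvFindAssist_eq (l msgs : List (List (String × String))) (i : Int)
    (h0 : 0 ≤ i) (hd : msgs.drop i.toNat = l) :
    pvFindAssist msgs (PySem.List.pyRange i (PySem.List.len msgs) 1) = pvFirstAssist l := by
  induction l generalizing i with
  | nil =>
    have hlen : msgs.length ≤ i.toNat := by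
      by_contra h
      simp [List.drop_eq_nil_iff] at hd
      omega
    rw [PySem.List.pyRange_one_eq_nil (by simp [PySem.List.len]; omega)]
    simp [pvFindAssist, pvFirstAssist]
  | cons m l' ih =>
    have hn : i.toNat < msgs.length := by
      by_contra h
      rw [List.drop_eq_nil_iff.mpr (by omega)] at hd
      simp at hd
    have hdrop := List.drop_eq_getElem_cons hn
    rw [hd] at hdrop
    injection hdrop with hm hl'
    rw [PySem.List.pyRange_one_cons (by simp only [PySem.List.len_eq]; omega)]
    simp only [pvFindAssist]
    rw [PySem.List.pyGet?_eq_some_getElem msgs h0 (by omega)]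
    rw [← hm]
    by_cases hrole : pvGet m "role" == some "assistant"
    · simp [pvFirstAssist, hrole]
    · simp only [pvFirstAssist, hrole, Bool.false_eq_true, if_false]
      exact ih (i + 1) (by omega)
        (by rw [show (i + 1).toNat = i.toNat + 1 by omega]; exact hl'.symm)

theorem pvPick_append (xs ys suf : List (List (String × String))) :
    pvPick (xs ++ ys) suf = (pvPick ys suf).or (pvPick xs (ys ++ suf)) := by
  induction xs with
  | nil => simp [pvPick]
  | cons x xs ih =>
    simp only [List.cons_append, pvPick, ih, List.append_assoc, Option.or_assoc]

theorem pvLoopA_eq (r suf : List (List (String × String))) (question : String) :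
    pvLoopA question (r.reverse ++ suf) (PySem.List.pyRange ((r.length : Int) - 1) (-1) (-1))
      = pvRender question (pvPick r.reverse suf) := by
  induction r generalizing suf with
  | nil =>
    rw [PySem.List.pyRange_neg_one_eq_nil (by simp)]
    simp [pvLoopA, pvPick, pvRender]
  | cons m r' ih =>
    have hj : ((m :: r').length : Int) - 1 = (r'.length : Int) := by
      simp [List.length_cons]
    rw [hj, PySem.List.pyRange_neg_one_cons (by omega)]
    have hmsgs : (m :: r').reverse ++ suf = r'.reverse ++ m :: suf := by
      simp [List.reverse_cons]
    rw [hmsgs]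
    simp only [pvLoopA]
    have hget : PySem.List.pyGet? (r'.reverse ++ m :: suf) ((r'.length : Int)) = some m := by
      have h := PySem.List.pyGet?_append_length (pre := r'.reverse) (y := m) (ys := suf)
      rw [List.length_reverse] at h
      exact h
    rw [hget]
    have hfa : pvFindAssist (r'.reverse ++ m :: suf)
        (PySem.List.pyRange ((r'.length : Int) + 1) (PySem.List.len (r'.reverse ++ m :: suf)) 1)
        = pvFirstAssist suf := by
      apply pvFindAssist_eq suf _ _ (by omega)
      rw [show ((r'.length : Int) + 1).toNat = (r'.reverse ++ [m]).length by simp]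
      rw [show r'.reverse ++ m :: suf = (r'.reverse ++ [m]) ++ suf by simp]
      exact List.drop_left
    rw [hfa]
    rw [List.reverse_cons, pvPick_append]
    have hsing : pvPick [m] suf
        = (if pvGet m "role" == some "user" && pvOkNext suf then some m else none) := by
      simp [pvPick]
    rw [hsing]
    by_cases huser : pvGet m "role" == some "user"
    · simp only [huser, Bool.not_true, Bool.false_eq_true, if_false, Bool.true_and]
      unfold pvOkNext
      cases hfb : pvFirstAssist suf with
      | none => simp [pvRender]
      | some a =>
        by_cases hbad : pvIsBad (PySem.Str.lower (pvGetD a "content" ""))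
        · simp only [hbad, if_true, Bool.not_true, Bool.false_eq_true, if_false, Option.none_or]
          exact ih (m :: suf)
        · simp [hbad, pvRender]
    · simp only [huser, Bool.not_false, Bool.false_and, if_true, Bool.false_eq_true, if_false,
        Option.none_or]
      exact ih (m :: suf)

def pvG : List (List (String × String)) → Option (List (String × String)) →
    Option (List (String × String))
  | [], p => p
  | m :: rest, p =>
    if pvGet m "role" == some "user" then pvG rest (some m)
    else if pvGet m "role" == some "assistant" then
      match p with
      | none => pvG rest none
      | some u =>
        if pvIsBad (PySem.Str.lower (pvGetD m "content" "")) then pvG rest none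
        else (pvG rest none).or (some u)
    else pvG rest p

theorem pvFoldB_eq (l : List (List (String × String)))
    (b p : Option (List (String × String))) :
    ((l.foldl pvStepB (b, p)).2.or (l.foldl pvStepB (b, p)).1) = (pvG l p).or b := by
  induction l generalizing b p with
  | nil => simp [pvG]
  | cons m l' ih =>
    simp only [List.foldl_cons]
    by_cases huser : pvGet m "role" == some "user"
    · simp only [pvStepB, huser, if_true, pvG, ih]
    · by_cases hassist : pvGet m "role" == some "assistant"
      · cases p with
        | none =>
          simp only [pvStepB, huser, Bool.false_eq_true, if_false, hassist, if_true, pvG, ih]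
        | some u =>
          by_cases hbad : pvIsBad (PySem.Str.lower (pvGetD m "content" ""))
          · simp only [pvStepB, huser, Bool.false_eq_true, if_false, hassist, if_true, hbad,
              pvG, ih]
          · simp only [pvStepB, huser, Bool.false_eq_true, if_false, hassist, if_true, hbad,
              pvG, ih, Option.or_assoc, Option.some_or]
      · simp only [pvStepB, huser, Bool.false_eq_true, if_false, hassist, pvG, ih]

theorem pvG_some (l : List (List (String × String))) (u : List (String × String)) :
    pvG l (some u) = (pvG l none).or (if pvOkNext l then some u else none) := by
  induction l generalizing u with
  | nil => simp [pvG, pvOkNext, pvFirstAssist]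
  | cons m rest ih =>
    by_cases huser : pvGet m "role" == some "user"
    · have hA : (pvGet m "role" == some "assistant") = false := by
        cases h : pvGet m "role" <;> simp_all
      simp only [pvG, huser, if_true]
      have hok : pvOkNext (m :: rest) = pvOkNext rest := by
        simp [pvOkNext, pvFirstAssist, hA]
      rw [hok, ih m]
      by_cases hr : pvOkNext rest
      · simp only [hr, if_true]
        cases pvG rest none <;> simp
      · simp [hr]
    · by_cases hassist : pvGet m "role" == some "assistant"
      · have hok : pvOkNext (m :: rest)
            = !pvIsBad (PySem.Str.lower (pvGetD m "content" "")) := by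
          simp [pvOkNext, pvFirstAssist, hassist]
        by_cases hbad : pvIsBad (PySem.Str.lower (pvGetD m "content" ""))
        · simp [pvG, huser, hassist, hbad, hok]
        · simp [pvG, huser, hassist, hbad, hok]
      · have hok : pvOkNext (m :: rest) = pvOkNext rest := by
          simp [pvOkNext, pvFirstAssist, hassist]
        simp only [pvG, huser, Bool.false_eq_true, if_false, hassist, hok]
        exact ih u

theorem pvG_none_eq_pick (l : List (List (String × String))) :
    pvG l none = pvPick l [] := by
  induction l with
  | nil => simp [pvG, pvPick]
  | cons m rest ih =>
    by_cases huser : pvGet m "role" == some "user"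
    · simp only [pvG, huser, if_true, pvPick, List.append_nil, Bool.true_and, pvG_some, ih]
    · by_cases hassist : pvGet m "role" == some "assistant"
      · simp [pvG, huser, hassist, pvPick, ih]
      · simp [pvG, huser, hassist, pvPick, ih]

-- ===== VERDICT (by name: the statement is the Claim_ definition above) =====
theorem contextualize_question_spec : Claim_equal_contextualize_question := by
  intro question msgs _ _
  unfold Spec_contextualize_question contextualize_question contextualize_question_alt
  by_cases hf : pvIsFollowup question
  · simp only [hf, Bool.not_true, Bool.false_eq_true, if_false]
    have hA := pvLoopA_eq msgs.reverse [] question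
    rw [List.reverse_reverse, List.append_nil, List.length_reverse] at hA
    rw [PySem.List.len_eq, hA]
    have hB := pvFoldB_eq msgs none none
    rw [Option.or_none, pvG_none_eq_pick] at hB
    rw [hB]
    cases pvPick msgs [] with
    | none => simp [pvRender]
    | some c => simp [pvRender]
  · simp [hf]
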